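-- pv_equiv track=rewrite | github.com/fawkesley/dailydigits | dailydigits.py | bytes_to_digits
-- ===== SOURCE A (Python) =====
-- def bytes_to_digits(bs, num_digits):
--     digits = []
--     bs = [b for b in bs]
--
--     for i in range(0, num_digits):
--         while True:
--             try:
--                 next_byte = bs.pop(0)
--             except IndexError:
--                 raise RanOutOfBytesError()
--
--             if next_byte > 249:
--                 continue
--             break
--
--         digits.append(next_byte % 10)
--
--     return digits
--
-- class RanOutOfBytesError(Exception):
--     pass
-- ===== SOURCE B (Python) =====
-- class RanOutOfBytesError(Exception):
--     pass
--
--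
-- def bytes_to_digits(bs, num_digits):
--     n = max(0, num_digits)
--     valid = [b % 10 for b in bs if b <= 249]
--     if len(valid) < n:
--         raise RanOutOfBytesError()
--     return valid[:n]
-- ===== Notes on version B (the rewrite author's own statement) =====
-- stated objective: simpler
-- what changed: Replaces the per-digit loop with a nested pop(0)-and-skip while by a single filter-map comprehension, one length check and a slice.
import Mathlib
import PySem

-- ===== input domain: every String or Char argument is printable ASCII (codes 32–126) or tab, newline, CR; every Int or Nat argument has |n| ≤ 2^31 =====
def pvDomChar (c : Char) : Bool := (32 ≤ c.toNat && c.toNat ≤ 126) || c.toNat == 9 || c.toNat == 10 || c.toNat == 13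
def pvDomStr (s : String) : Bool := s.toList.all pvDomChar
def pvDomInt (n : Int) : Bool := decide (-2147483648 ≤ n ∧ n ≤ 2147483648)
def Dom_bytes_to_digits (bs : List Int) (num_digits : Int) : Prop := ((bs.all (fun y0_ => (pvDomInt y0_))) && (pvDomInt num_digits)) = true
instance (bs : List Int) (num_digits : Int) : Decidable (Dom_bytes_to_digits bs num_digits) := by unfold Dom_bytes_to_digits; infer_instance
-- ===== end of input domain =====

-- B replaces A's per-digit loop with nested pop-and-skip by one filter-map pass,
-- a length check and a slice (objective: simpler). Pre_ excludes the inputs on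
-- which A raises RanOutOfBytesError (too few usable bytes); both Pythons raise there.

-- ===== PORT A =====
-- A's inner `while True: pop(0); skip if > 249`: none = IndexError → RanOutOfBytesError
def popValid : List Int → Option (Int × List Int)
  | [] => none
  | b :: rest => if b > 249 then popValid rest else some (b, rest)

-- the `for i in range(0, num_digits)` loop, one call per iteration; none = the raise
def aGo : Nat → List Int → List Int → Option (List Int)
  | 0, _, digits => some digits
  | k+1, bs, digits =>
    match popValid bs with
    | none => none
    | some (b, rest) => aGo k rest (digits ++ [PySem.Int.mod b 10])

def bytes_to_digits (bs : List Int) (num_digits : Int) : List Int :=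
  (aGo num_digits.toNat bs []).getD []

-- ===== PORT B =====
-- `valid = [b % 10 for b in bs if b <= 249]`; `valid[:n]` with n = max(0, num_digits)
def bytes_to_digits_alt (bs : List Int) (num_digits : Int) : List Int :=
  let n : Int := max 0 num_digits
  let valid := (bs.filter (fun b => decide (b ≤ 249))).map (fun b => PySem.Int.mod b 10)
  if (valid.length : Int) < n then []   -- B raises RanOutOfBytesError here (outside Pre_)
  else valid.take n.toNat

-- ===== PRECONDITION & SPEC =====
-- Pre_ excludes exactly the inputs on which A raises RanOutOfBytesError:
-- fewer than num_digits bytes ≤ 249 are available.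
def Pre_bytes_to_digits (bs : List Int) (num_digits : Int) : Prop :=
  num_digits ≤ ((bs.filter (fun b => decide (b ≤ 249))).length : Int)
instance (bs : List Int) (num_digits : Int) : Decidable (Pre_bytes_to_digits bs num_digits) := by
  unfold Pre_bytes_to_digits; infer_instance

def pvWitness_bytes_to_digits : List Int × Int := ([7, 250, 255, 23, 100], 3)

def Spec_bytes_to_digits (bs : List Int) (num_digits : Int) (out : List Int) : Prop := out = bytes_to_digits_alt bs num_digits
instance (bs : List Int) (num_digits : Int) (out : List Int) : Decidable (Spec_bytes_to_digits bs num_digits out) := by unfold Spec_bytes_to_digits; infer_instance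

-- ===== CLAIM (what is proved, stated in full; the proofs are below) =====
def Claim_equal_bytes_to_digits : Prop := ∀ (bs : List Int) (num_digits : Int), Dom_bytes_to_digits bs num_digits → Pre_bytes_to_digits bs num_digits → Spec_bytes_to_digits bs num_digits (bytes_to_digits bs num_digits)

-- ===== LEMMAS AND PROOFS =====

-- popValid finds the first filtered element and the remainder's filter is the tail
theorem popValid_filter (bs : List Int) :
    (∀ (h : (bs.filter (fun b => decide (b ≤ 249))) = []), popValid bs = none) ∧
    (∀ v vs, (bs.filter (fun b => decide (b ≤ 249))) = v :: vs →
      ∃ rest, popValid bs = some (v, rest) ∧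
        rest.filter (fun b => decide (b ≤ 249)) = vs) := by
  induction bs with
  | nil => simp [popValid]
  | cons b bs ih =>
    by_cases hb : b > 249
    · have hbf : (decide (b ≤ 249)) = false := by simp; omega
      constructor
      · intro h
        simp [List.filter, hbf] at h
        simp [popValid, hb]
        exact ih.1 (by simpa using h)
      · intro v vs h
        simp [List.filter, hbf] at h
        obtain ⟨rest, hr, hf⟩ := ih.2 v vs (by simpa using h)
        exact ⟨rest, by simp [popValid, hb, hr], hf⟩
    · have hbf : (decide (b ≤ 249)) = true := by simp; omega
      constructor
      · intro h; simp [List.filter, hbf] at h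
      · intro v vs h
        simp [List.filter, hbf] at h
        obtain ⟨h1, h2⟩ := h
        subst h1
        exact ⟨bs, by simp [popValid, hb], h2⟩

theorem aGo_eq (k : Nat) : ∀ (bs digits : List Int),
    k ≤ (bs.filter (fun b => decide (b ≤ 249))).length →
    aGo k bs digits =
      some (digits ++ ((bs.filter (fun b => decide (b ≤ 249))).map
        (fun b => PySem.Int.mod b 10)).take k) := by
  induction k with
  | zero => intro bs digits _; simp [aGo]
  | succ k ih =>
    intro bs digits hlen
    cases hf : bs.filter (fun b => decide (b ≤ 249)) with
    | nil => rw [hf] at hlen; simp at hlen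
    | cons v vs =>
      obtain ⟨rest, hpop, hrest⟩ := (popValid_filter bs).2 v vs hf
      rw [hf] at hlen
      have := ih rest (digits ++ [PySem.Int.mod v 10]) (by rw [hrest]; simpa using hlen)
      simp only [aGo, hpop]
      rw [this, hrest]
      simp [List.take_succ_cons, PySem.Int.mod]

-- ===== VERDICT (by name: the statement is the Claim_ definition above) =====
theorem bytes_to_digits_spec : Claim_equal_bytes_to_digits := by
  intro bs num_digits _ hpre
  unfold Spec_bytes_to_digits bytes_to_digits bytes_to_digits_alt
  unfold Pre_bytes_to_digits at hpre
  set valid := (bs.filter (fun b => decide (b ≤ 249))).map (fun b => PySem.Int.mod b 10) with hv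
  have hlen : num_digits.toNat ≤ (bs.filter (fun b => decide (b ≤ 249))).length := by omega
  have hvl : valid.length = (bs.filter (fun b => decide (b ≤ 249))).length := by
    simp [hv]
  rw [aGo_eq num_digits.toNat bs [] hlen]
  have hnot : ¬ ((valid.length : Int) < max 0 num_digits) := by
    rw [hvl]; omega
  simp only [hnot, Option.getD_some, List.nil_append]
  congr 1
  omega
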